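-- pv_equiv track=rewrite | github.com/lauracarlotta/pacote-desafios-pythonicos | _test.py | both_ends
-- ===== SOURCE A (Python) =====
-- def both_ends(s):
--     # +++ SUA SOLUÇÃO +++
--     # SOLUTION 4 - COM WHILE
--     string_received = s
--     result = ''
--     if len(string_received) < 2:
--         result = ''
--     else:
--         cont = 0
--         while cont != 2:
--             result += s[cont]
--             cont += 1
--         cont = 2
--         while cont != 0:
--             result += s[len(s) - cont]
--             cont -= 1
--     return result
-- ===== SOURCE B (Python) =====
-- def both_ends(s):
--     if len(s) < 2:
--         return ''
--     return s[:2] + s[-2:]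
-- ===== Notes on version B (the rewrite author's own statement) =====
-- stated objective: idiomatic
-- what changed: Replaces the two while-loops with character-by-character accumulation by a guard plus two slice operations (s[:2] + s[-2:]).
import Mathlib
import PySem

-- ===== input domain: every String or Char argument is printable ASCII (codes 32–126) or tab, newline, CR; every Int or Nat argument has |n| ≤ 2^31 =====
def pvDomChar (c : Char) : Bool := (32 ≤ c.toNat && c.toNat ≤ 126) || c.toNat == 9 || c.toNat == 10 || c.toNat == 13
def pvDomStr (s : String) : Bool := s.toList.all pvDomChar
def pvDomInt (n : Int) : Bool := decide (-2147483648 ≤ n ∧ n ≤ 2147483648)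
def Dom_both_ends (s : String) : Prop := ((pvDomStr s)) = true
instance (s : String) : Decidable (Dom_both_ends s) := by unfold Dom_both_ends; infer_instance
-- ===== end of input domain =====

-- B replaces A's two while-loops with a length guard plus two slices (idiomatic decomposition); return values agree on all strings.
-- ===== PORT A =====
-- first while: 'while cont != 2: result += s[cont]; cont += 1'
def both_ends_loop1 (sc : List Char) (cont : Nat) (result : List Char) : List Char :=
  if cont = 2 then result
  else if _h : cont < 2 then  -- totality guard only; the Python loop never reaches cont > 2
    both_ends_loop1 sc (cont + 1) (result ++ [(PySem.List.pyGet? sc (cont : Int)).getD ' '])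
  else result
  termination_by 2 - cont

-- second while: 'while cont != 0: result += s[len(s) - cont]; cont -= 1'
def both_ends_loop2 (sc : List Char) (cont : Nat) (result : List Char) : List Char :=
  if cont = 0 then result
  else both_ends_loop2 sc (cont - 1) (result ++ [(PySem.List.pyGet? sc ((sc.length : Int) - (cont : Int))).getD ' '])
  termination_by cont

def both_ends (s : String) : String :=
  let sc := s.toList
  if sc.length < 2 then ""
  else String.ofList (both_ends_loop2 sc 2 (both_ends_loop1 sc 0 []))

-- ===== PORT B =====
def both_ends_alt (s : String) : String :=
  let sc := s.toList
  if sc.length < 2 then ""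
  else String.ofList (PySem.List.slice sc none (some 2) ++ PySem.List.slice sc (some (-2)) none)

-- ===== PRECONDITION & SPEC =====
def Spec_both_ends (s : String) (out : String) : Prop := out = both_ends_alt s
instance (s : String) (out : String) : Decidable (Spec_both_ends s out) := by unfold Spec_both_ends; infer_instance

-- ===== CLAIM (what is proved, stated in full; the proofs are below) =====
def Claim_equal_both_ends : Prop := ∀ (s : String), Dom_both_ends s → Spec_both_ends s (both_ends s)

-- ===== LEMMAS AND PROOFS =====

-- ===== VERDICT (by name: the statement is the Claim_ definition above) =====
-- drop (len-2) written with the two getD-indexed elements A's second loop produces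

-- drop (len-2) written with the two indexed elements A's second loop produces
theorem drop_two_ends (l : List Char) : ∀ (a b : Char),
    (a :: b :: l).drop l.length =
      [((a :: b :: l)[l.length]?).getD ' ', ((a :: b :: l)[l.length + 1]?).getD ' '] := by
  induction l with
  | nil => intro a b; rfl
  | cons c l ih =>
    intro a b
    simpa [List.drop_succ_cons] using ih b c

theorem loop1_eval (a b : Char) (rest : List Char) :
    both_ends_loop1 (a :: b :: rest) 0 [] = [a, b] := by
  have g0 := PySem.List.pyGet?_ofNat (a :: b :: rest) 0 (by simp)
  simp only [Nat.cast_zero, Nat.cast_one] at g0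
  simp [both_ends_loop1, g0]

theorem loop2_eval (sc : List Char) (r : List Char) :
    both_ends_loop2 sc 2 r =
      r ++ [(PySem.List.pyGet? sc ((sc.length : Int) - 2)).getD ' ',
            (PySem.List.pyGet? sc ((sc.length : Int) - 1)).getD ' '] := by
  simp [both_ends_loop2]

theorem both_ends_spec : Claim_equal_both_ends := by
  intro s _
  unfold Spec_both_ends both_ends both_ends_alt
  rcases hl : s.toList with _ | ⟨a, t⟩
  · rfl
  · rcases t with _ | ⟨b, rest⟩
    · rfl
    · simp only [List.length_cons]
      rw [if_neg (by omega), if_neg (by omega), loop2_eval, loop1_eval]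
      rw [PySem.List.slice_from_neg_ofNat _ 2 (by omega),
          PySem.List.slice_to (a :: b :: rest) (by omega : (0:Int) ≤ 2)]
      have e2 : ((rest.length + 1 + 1 : Nat) : Int) - 2 = ((rest.length : Nat) : Int) := by
        push_cast; ring
      have e1 : ((rest.length + 1 + 1 : Nat) : Int) - 1 = ((rest.length + 1 : Nat) : Int) := by
        push_cast; ring
      simp only [List.length_cons] at e2 e1 ⊢
      rw [e2, e1, PySem.List.pyGet?_natCast, PySem.List.pyGet?_natCast]
      have hd : (a :: b :: rest).drop (rest.length + 1 + 1 - 2) =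
          [((a :: b :: rest)[rest.length]?).getD ' ', ((a :: b :: rest)[rest.length + 1]?).getD ' '] := by
        simpa using drop_two_ends rest a b
      rw [hd]
      rfl
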